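-- pv_equiv track=rewrite | github.com/usman-robin/coding_project | Array/array_index_of_nonzero_elements.py | getZeroIndexes
-- ===== SOURCE A (Python) =====
-- def getZeroIndexes(li):
--     begin = 0
--     end = 0
--     indexes = []
--     zero = False
--     for ind, elt in enumerate(li):
--         if not elt and not zero:
--             begin = ind
--             zero = True
--         if not elt and zero:
--             end = ind
--             if ind == len(li) - 1:
--                 indexes.append((begin, end))
--         if elt and zero:
--             zero = False
--             if begin == end:
--                 indexes.append((begin, begin))
--             else:
--                 indexes.append((begin, end))
--
--     return indexes
-- ===== SOURCE B (Python) =====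
-- def getZeroIndexes(li):
--     def count_leading_zeros(xs, start):
--         c = 0
--         for k in range(start, len(xs)):
--             if xs[k]:
--                 break
--             c += 1
--         return c
--
--     res = []
--     n = len(li)
--     i = 0
--     while i < n:
--         if li[i]:
--             i += 1
--         else:
--             k = count_leading_zeros(li, i + 1)
--             res.append((i, i + k))
--             i += k + 1
--     return res
-- ===== Notes on version B (the rewrite author's own statement) =====
-- stated objective: alternative
-- what changed: Replaces A's per-element boolean state machine (begin/end/zero flags with three sequential ifs and a last-index special case) by a run-consuming scan: on hitting a zero, count the remaining leading zeros, emit the run's endpoints in one step and skip past the run.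
import Mathlib
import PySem

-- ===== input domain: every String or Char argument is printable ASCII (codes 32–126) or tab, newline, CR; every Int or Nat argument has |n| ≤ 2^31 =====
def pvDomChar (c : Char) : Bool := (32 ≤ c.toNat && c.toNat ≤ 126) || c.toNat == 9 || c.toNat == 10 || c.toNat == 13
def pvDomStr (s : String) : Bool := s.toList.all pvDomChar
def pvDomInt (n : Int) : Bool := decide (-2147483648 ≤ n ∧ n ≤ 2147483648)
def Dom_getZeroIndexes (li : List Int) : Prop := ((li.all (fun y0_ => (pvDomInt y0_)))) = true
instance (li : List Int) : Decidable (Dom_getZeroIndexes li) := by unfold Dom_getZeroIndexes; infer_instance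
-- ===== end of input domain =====

-- B replaces A's per-element boolean state machine by a run-consuming scan
-- (count the leading zeros of the rest, emit the run's endpoints, skip past it);
-- alternative decomposition, same cost.

-- ===== PORT A =====
-- one step of A's for-loop body: state = (begin, end, indexes, zero), input = (ind, elt)
def stepA (n : Int) (st : Int × Int × List (Int × Int) × Bool) (p : Int × Int) :
    Int × Int × List (Int × Int) × Bool :=
  let (b, e, idxs, z) := st
  let (ind, elt) := p
  let (b, z) := if elt = 0 ∧ z = false then (ind, true) else (b, z)
  let (e, idxs) := if elt = 0 ∧ z = true then
      (ind, if ind = n - 1 then idxs ++ [(b, ind)] else idxs) else (e, idxs)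
  let (z, idxs) := if elt ≠ 0 ∧ z = true then
      (false, if b = e then idxs ++ [(b, b)] else idxs ++ [(b, e)]) else (z, idxs)
  (b, e, idxs, z)

def getZeroIndexes (li : List Int) : List (Int × Int) :=
  ((PySem.List.enumerate li).foldl (stepA (li.length : Int)) (0, 0, [], false)).2.2.1

-- ===== PORT B =====
-- count_leading_zeros helper of Source B
def countLZ : List Int → Nat
  | [] => 0
  | x :: xs => if x ≠ 0 then 0 else countLZ xs + 1

-- the while loop of Source B: i = current index, res = accumulator, argument = rest
def altLoop (i : Int) (res : List (Int × Int)) : List Int → List (Int × Int)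
  | [] => res
  | x :: rest =>
    if x ≠ 0 then altLoop (i + 1) res rest
    else
      altLoop (i + (countLZ rest : Int) + 1)
        (res ++ [(i, i + (countLZ rest : Int))]) (rest.drop (countLZ rest))
termination_by l => l.length
decreasing_by
  all_goals simp [List.length_drop]

def getZeroIndexes_alt (li : List Int) : List (Int × Int) := altLoop 0 [] li

-- ===== PRECONDITION & SPEC =====
def Spec_getZeroIndexes (li : List Int) (out : List (Int × Int)) : Prop := out = getZeroIndexes_alt li
instance (li : List Int) (out : List (Int × Int)) : Decidable (Spec_getZeroIndexes li out) := by unfold Spec_getZeroIndexes; infer_instance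

-- ===== CLAIM (what is proved, stated in full; the proofs are below) =====
def Claim_equal_getZeroIndexes : Prop := ∀ (li : List Int), Dom_getZeroIndexes li → Spec_getZeroIndexes li (getZeroIndexes li)

-- ===== LEMMAS AND PROOFS =====

-- Combined loop invariant:
-- (1) with zero=false, A's remaining fold equals B's loop;
-- (2) with zero=true, end = i-1 and a nonempty remainder, A's fold closes the
--     current run exactly where B's countLZ-based step puts it.
theorem main_inv (n : Int) : ∀ (xs : List Int),
    (∀ (i : Int) (acc : List (Int × Int)) (b e : Int), n = i + xs.length →
      ((PySem.List.enumerate xs i).foldl (stepA n) (b, e, acc, false)).2.2.1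
        = altLoop i acc xs)
    ∧ (xs ≠ [] → ∀ (i : Int) (acc : List (Int × Int)) (b : Int), n = i + xs.length →
      ((PySem.List.enumerate xs i).foldl (stepA n) (b, i - 1, acc, true)).2.2.1
        = altLoop (i + (countLZ xs : Int))
            (acc ++ [(b, i - 1 + (countLZ xs : Int))]) (xs.drop (countLZ xs))) := by
  intro xs
  induction xs with
  | nil =>
    constructor
    · intro i acc b e _
      simp [PySem.List.enumerate_nil, altLoop]
    · intro h; exact absurd rfl h
  | cons x rest ih =>
    obtain ⟨ih1, ih2⟩ := ih
    constructor
    · intro i acc b e hn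
      simp only [PySem.List.enumerate_cons, List.foldl_cons]
      by_cases hx : x = 0
      · subst hx
        rcases rest with _ | ⟨y, rs⟩
        · -- single trailing zero: ind = n-1, append now
          simp at hn
          simp [stepA, hn, PySem.List.enumerate_nil, altLoop, countLZ]
        · have hne : i ≠ n - 1 := by simp at hn; omega
          have hstep : stepA n (b, e, acc, false) (i, (0 : Int)) = (i, i, acc, true) := by
            simp [stepA, hne]
          rw [hstep]
          have h2 := ih2 (by simp) (i + 1) acc i (by simp only [List.length_cons] at hn ⊢; omega)
          have : i + 1 - 1 = i := by omega
          rw [this] at h2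
          rw [show i + 1 + (countLZ (y :: rs) : Int) = i + (countLZ (y :: rs) : Int) + 1 by omega] at h2
          rw [h2]
          simp [altLoop]
      · have hstep : stepA n (b, e, acc, false) (i, x) = (b, e, acc, false) := by
          simp [stepA, hx]
        rw [hstep, ih1 (i + 1) acc b e (by simp only [List.length_cons] at hn ⊢; omega)]
        rw [show altLoop i acc (x :: rest) = altLoop (i + 1) acc rest by simp [altLoop, hx]]
    · intro _ i acc b hn
      simp only [PySem.List.enumerate_cons, List.foldl_cons]
      by_cases hx : x = 0
      · subst hx
        rcases rest with _ | ⟨y, rs⟩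
        · -- run ends at the last element: A appends at ind = n-1
          simp at hn
          simp [stepA, hn, PySem.List.enumerate_nil, countLZ, altLoop]
        · have hne : i ≠ n - 1 := by simp at hn; omega
          have hstep : stepA n (b, i - 1, acc, true) (i, (0 : Int)) = (b, i, acc, true) := by
            simp [stepA, hne]
          rw [hstep]
          have h2 := ih2 (by simp) (i + 1) acc b (by simp only [List.length_cons] at hn ⊢; omega)
          have : i + 1 - 1 = i := by omega
          rw [this] at h2
          have hc : countLZ (0 :: y :: rs) = countLZ (y :: rs) + 1 := by simp [countLZ]
          rw [h2, hc]
          push_cast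
          rw [show i + 1 + (countLZ (y :: rs) : Int) = i + ((countLZ (y :: rs) : Int) + 1) by omega,
              show i + (countLZ (y :: rs) : Int) = i - 1 + ((countLZ (y :: rs) : Int) + 1) by omega,
              List.drop_succ_cons]
      · -- nonzero element closes the run
        have hstep : stepA n (b, i - 1, acc, true) (i, x) =
            (b, i - 1, acc ++ [(b, i - 1)], false) := by
          by_cases hb : b = i - 1 <;> simp [stepA, hx, hb]
        rw [hstep, ih1 (i + 1) (acc ++ [(b, i - 1)]) b (i - 1) (by simp only [List.length_cons] at hn ⊢; omega)]
        have hc : countLZ (x :: rest) = 0 := by simp [countLZ, hx]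
        rw [hc]
        simp only [Nat.cast_zero, add_zero, List.drop_zero]
        rw [show altLoop i (acc ++ [(b, i - 1)]) (x :: rest)
            = altLoop (i + 1) (acc ++ [(b, i - 1)]) rest by simp [altLoop, hx]]

-- ===== VERDICT (by name: the statement is the Claim_ definition above) =====
theorem getZeroIndexes_spec : Claim_equal_getZeroIndexes := by
  intro li _
  unfold Spec_getZeroIndexes getZeroIndexes getZeroIndexes_alt
  exact (main_inv (li.length : Int) li).1 0 [] 0 0 (by simp)
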